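-- pv_equiv track=rewrite | github.com/SabaKuridze1/Group-40 | Day 92/homework/hw2.py | sort_by_vowel_count
-- ===== SOURCE A (Python) =====
-- def sort_by_vowel_count(my_list):
--   def count_vowels(s):
--     vowels = "aeiou"
--     count = 0
--     for char in s.lower():
--       if char in vowels:
--         count += 1
--     return count
--
--   return sorted(my_list, key=count_vowels, reverse=True)
-- ===== SOURCE B (Python) =====
-- def sort_by_vowel_count(my_list):
--     # Bucket (counting) sort: index strings by vowel count, then emit buckets
--     # in descending count order; appending in input order keeps ties stable.
--     def count_vowels(s):
--         return sum(1 for ch in s.lower() if ch in "aeiou")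
--
--     buckets = {}
--     for s in my_list:
--         buckets.setdefault(count_vowels(s), []).append(s)
--     result = []
--     for k in sorted(buckets, reverse=True):
--         result += buckets[k]
--     return result
-- ===== Notes on version B (the rewrite author's own statement) =====
-- stated objective: alternative
-- what changed: Replaces the comparison sort with a counting/bucket sort: vowel counts index a dict of buckets built in one pass (preserving input order within a bucket), and the result is the concatenation of buckets over the distinct counts in descending order.
import Mathlib
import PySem

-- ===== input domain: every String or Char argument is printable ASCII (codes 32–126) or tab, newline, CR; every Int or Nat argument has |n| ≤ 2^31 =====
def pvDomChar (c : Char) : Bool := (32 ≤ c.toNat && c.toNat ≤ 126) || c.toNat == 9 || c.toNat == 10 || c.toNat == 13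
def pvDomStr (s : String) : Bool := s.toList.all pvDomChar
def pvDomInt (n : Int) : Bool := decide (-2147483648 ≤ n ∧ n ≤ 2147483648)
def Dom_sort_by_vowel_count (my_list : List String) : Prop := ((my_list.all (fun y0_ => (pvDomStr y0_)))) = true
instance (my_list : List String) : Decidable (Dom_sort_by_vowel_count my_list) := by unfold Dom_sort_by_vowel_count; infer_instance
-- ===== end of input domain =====

-- B replaces the stable comparison sort with a bucket (counting) sort over a dict indexed
-- by vowel count, emitted in descending count order (alternative algorithm, same result).

-- ===== PORT A =====
-- inner helper count_vowels of A: loop over s.lower(), += 1 when the char is a vowel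
def countVowelsA (s : String) : Int :=
  ((PySem.Str.lower s).toList).foldl
    (fun count char => if char ∈ "aeiou".toList then count + 1 else count) 0

def sort_by_vowel_count (my_list : List String) : List String :=
  PySem.List.sorted my_list countVowelsA true

-- ===== PORT B =====
-- B's count_vowels: sum(1 for ch in s.lower() if ch in "aeiou")
def countVowelsB (s : String) : Int :=
  ((((PySem.Str.lower s).toList).filter (fun ch => ch ∈ "aeiou".toList)).map
    (fun _ => (1 : Int))).sum

def sort_by_vowel_count_alt (my_list : List String) : List String :=
  let buckets := my_list.foldl
    (fun d s => d.modify (countVowelsB s) [] (fun b => b ++ [s])) PySem.Dict.empty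
  -- buckets[k]: k ranges over buckets' keys, so the lookup always succeeds; getD is exact here
  (PySem.List.sorted buckets.keys (fun k => k) true).foldl
    (fun result k => result ++ buckets.getD k []) []

-- ===== PRECONDITION & SPEC =====
def Spec_sort_by_vowel_count (my_list : List String) (out : List String) : Prop := out = sort_by_vowel_count_alt my_list
instance (my_list : List String) (out : List String) : Decidable (Spec_sort_by_vowel_count my_list out) := by unfold Spec_sort_by_vowel_count; infer_instance

-- ===== CLAIM (what is proved, stated in full; the proofs are below) =====
def Claim_equal_sort_by_vowel_count : Prop := ∀ (my_list : List String), Dom_sort_by_vowel_count my_list → Spec_sort_by_vowel_count my_list (sort_by_vowel_count my_list)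

-- ===== LEMMAS AND PROOFS =====

-- the two vowel counters agree
theorem countVowels_eq (s : String) : countVowelsB s = countVowelsA s := by
  unfold countVowelsA countVowelsB
  rw [PySem.List.foldl_ite_add_one (fun char => char ∈ "aeiou".toList)]
  rw [PySem.List.sum_map_const_int]
  simp [List.countP_eq_length_filter]

-- insertBy places x after P (where it never goes before) and before S (where it always does)
theorem insertBy_split {α : Type} (bef : α → α → Bool) (x : α) (P S : List α)
    (hP : ∀ y ∈ P, bef x y = false) (hS : ∀ y ∈ S, bef x y = true) :
    PySem.List.insertBy bef x (P ++ S) = P ++ x :: S := by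
  induction P with
  | nil =>
    cases S with
    | nil => simp [PySem.List.insertBy]
    | cons s t => simp [PySem.List.insertBy, hS s (by simp)]
  | cons p P ih =>
    simp only [List.cons_append, PySem.List.insertBy, hP p (by simp), Bool.false_eq_true,
      if_false]
    rw [ih (fun y hy => hP y (by simp [hy])) ]

theorem dropWhile_all_lt_of_not_mem (c : Int) :
    ∀ (l : List Int), l.Pairwise (fun a b => b < a) → c ∉ l →
      ∀ k ∈ l.dropWhile (fun k => decide (c < k)), k < c := by
  intro l
  induction l with
  | nil => intro _ _ k hk; simp at hk
  | cons a t ih =>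
    intro hp hc k hk
    rw [List.pairwise_cons] at hp
    by_cases hca : c < a
    · rw [List.dropWhile_cons_of_pos (by simpa using hca)] at hk
      exact ih hp.2 (fun h => hc (by simp [h])) k hk
    · rw [List.dropWhile_cons_of_neg (by simpa using hca)] at hk
      have hac : a < c := lt_of_le_of_ne (not_lt.mp hca) (fun h => hc (by simp [h.symm]))
      rcases List.mem_cons.mp hk with hk | hk
      · exact hk ▸ hac
      · exact lt_trans (hp.1 k hk) hac

theorem dropWhile_eq_cons_of_mem (c : Int) :
    ∀ (l : List Int), l.Pairwise (fun a b => b < a) → c ∈ l →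
      ∃ t, l.dropWhile (fun k => decide (c < k)) = c :: t ∧ ∀ k ∈ t, k < c := by
  intro l
  induction l with
  | nil => intro _ hc; simp at hc
  | cons a t ih =>
    intro hp hc
    rw [List.pairwise_cons] at hp
    by_cases hca : c < a
    · have hct : c ∈ t := by
        rcases List.mem_cons.mp hc with h | h
        · exact absurd (h ▸ hca) (lt_irrefl a)
        · exact h
      rw [List.dropWhile_cons_of_pos (by simpa using hca)]
      exact ih hp.2 hct
    · rw [List.dropWhile_cons_of_neg (by simpa using hca)]
      have hac : c = a := by
        rcases List.mem_cons.mp hc with hc | hc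
        · exact hc
        · exact absurd (lt_of_lt_of_le (hp.1 c hc) (not_lt.mp hca)) (lt_irrefl c)
      exact ⟨t, by rw [hac], fun k hk => hac ▸ hp.1 k hk⟩

theorem flatMap_congr_mem {α β : Type} {l : List α} {f g : α → List β}
    (h : ∀ a ∈ l, f a = g a) : l.flatMap f = l.flatMap g := by
  induction l with
  | nil => rfl
  | cons a t ih =>
    simp only [List.flatMap_cons, h a (by simp), ih (fun b hb => h b (by simp [hb]))]

-- canonical bucket decomposition: buckets over the distinct keys, in descending key order
def canon {α : Type} [DecidableEq α] (key : α → Int) (xs : List α) : List α :=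
  (PySem.List.sorted (PySem.Set.ofList (xs.map key)) (fun k => k) true).flatMap
    (fun k => xs.filter (fun s => key s == k))

-- members of a bucket have the bucket's key
theorem mem_bucket_key {α : Type} [DecidableEq α] (key : α → Int) (xs : List α) (k : Int)
    (y : α) (hy : y ∈ xs.filter (fun s => key s == k)) : key y = k := by
  have := (List.mem_filter.mp hy).2
  simpa using this

theorem sorted_eq_canon {α : Type} [DecidableEq α] (key : α → Int) (xs : List α) :
    PySem.List.sorted xs key true = canon key xs := by
  induction xs using List.reverseRecOn with
  | nil => simp [canon, PySem.List.sorted, PySem.Set.ofList]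
  | append_singleton xs x ih =>
    -- LHS: one insertBy step on sorted xs
    rw [PySem.List.sorted_rev_eq_foldl_insertBy, List.foldl_append, List.foldl_cons,
      List.foldl_nil, ← PySem.List.sorted_rev_eq_foldl_insertBy, ih]
    set c := key x with hc
    set S := PySem.Set.ofList (xs.map key) with hS
    set ks := PySem.List.sorted S (fun k => k) true with hks
    set f : Int → List α := fun k => xs.filter (fun s => key s == k) with hf
    -- descending, distinct keys
    have hnodup : ks.Nodup := (PySem.List.sorted_perm S (fun k => k) true).symm.nodup
      (PySem.Set.nodup_ofList (xs.map key))
    have hdesc : ks.Pairwise (fun a b => b < a) := by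
      have h1 := PySem.List.sorted_pairwise_rev S (fun k => k)
      have := h1.and hnodup
      exact this.imp (fun {a b} h => lt_of_le_of_ne h.1 (fun he => h.2 he.symm))
    set kgt := ks.takeWhile (fun k => decide (c < k)) with hkgt
    set krest := ks.dropWhile (fun k => decide (c < k)) with hkrest
    have hgt : ∀ k ∈ kgt, c < k := fun k hk => by
      simpa using List.mem_takeWhile_imp hk
    have hsplit : kgt ++ krest = ks := List.takeWhile_append_dropWhile
    -- new key list
    have hmapapp : (xs ++ [x]).map key = xs.map key ++ [c] := by simp [hc]
    have hofapp : PySem.Set.ofList ((xs ++ [x]).map key) = PySem.Set.add S c := by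
      rw [hmapapp]; simp [PySem.Set.ofList, List.foldl_append, hS]
    -- new buckets
    have hfilt : ∀ k : Int, (xs ++ [x]).filter (fun s => key s == k)
        = f k ++ (if c == k then [x] else []) := by
      intro k
      rw [List.filter_append]
      simp [hf, List.filter_singleton, hc]
    have hcanon : canon key xs = ks.flatMap f := rfl
    have hcanon2 : canon key (xs ++ [x])
        = (PySem.List.sorted (PySem.Set.add S c) (fun k => k) true).flatMap
            (fun k => f k ++ (if c == k then [x] else [])) := by
      unfold canon
      rw [hofapp]
      congr 1
      funext k
      exact hfilt k
    rw [hcanon, hcanon2]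
    by_cases hmem : c ∈ xs.map key
    · -- existing key: the key list is unchanged, x joins the end of its bucket
      have hcS : c ∈ S := (PySem.Set.mem_ofList _ _).mpr hmem
      have hadd : PySem.Set.add S c = S := by
        simp [PySem.Set.add, hcS]
      have hcks : c ∈ ks := by
        rw [hks]; exact (PySem.List.mem_sorted _ _ _ _).mpr hcS
      obtain ⟨klt, hkr, hklt⟩ := dropWhile_eq_cons_of_mem c ks hdesc hcks
      have hks2 : ks = kgt ++ c :: klt := by rw [← hsplit, hkrest, hkr]
      have e1 : kgt.flatMap (fun k => f k ++ if c == k then [x] else []) = kgt.flatMap f :=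
        flatMap_congr_mem (fun k hk => by simp [Int.ne_of_lt (hgt k hk)])
      have e2 : klt.flatMap (fun k => f k ++ if c == k then [x] else []) = klt.flatMap f :=
        flatMap_congr_mem (fun k hk => by simp [Int.ne_of_gt (hklt k hk)])
      rw [hadd, ← hks, hks2]
      rw [List.flatMap_append, List.flatMap_cons, List.flatMap_append, List.flatMap_cons,
        e1, e2]
      simp only [beq_self_eq_true, if_true]
      rw [← List.append_assoc]
      rw [insertBy_split (fun a b => decide (key b < key a)) x
        (kgt.flatMap f ++ f c) (klt.flatMap f)
        (by
          intro y hy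
          rcases List.mem_append.mp hy with hy | hy
          · obtain ⟨k, hk, hyk⟩ := List.mem_flatMap.mp hy
            have hky : key y = k := mem_bucket_key key xs k y hyk
            simp [hky, ← hc, not_lt.mpr (le_of_lt (hgt k hk))]
          · have hky : key y = c := mem_bucket_key key xs c y hy
            simp [hky, ← hc])
        (by
          intro y hy
          obtain ⟨k, hk, hyk⟩ := List.mem_flatMap.mp hy
          have hky : key y = k := mem_bucket_key key xs k y hyk
          simp [hky, ← hc, hklt k hk])]
      simp
    · -- new key: c is spliced into the descending key list, its bucket is [x]
      have hcS : c ∉ S := fun h => hmem ((PySem.Set.mem_ofList _ _).mp h)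
      have hadd : PySem.Set.add S c = S ++ [c] := by
        simp only [PySem.Set.add]
        rw [if_neg (by simpa using hcS)]
      have hcks : c ∉ ks := fun h => hcS ((PySem.List.mem_sorted _ _ _ _).mp (hks ▸ h))
      have hklt : ∀ k ∈ krest, k < c := by
        rw [hkrest]; exact dropWhile_all_lt_of_not_mem c ks hdesc hcks
      have hsorted' : PySem.List.sorted (S ++ [c]) (fun k => k) true = kgt ++ c :: krest := by
        apply PySem.List.sorted_rev_eq_of_perm_of_pairwise_gt
        · refine List.Perm.trans List.perm_middle ?_
          rw [hsplit]
          refine List.Perm.trans ?_ (List.perm_append_singleton c S).symm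
          exact (PySem.List.sorted_perm S (fun k => k) true).cons c
        · rw [List.pairwise_append]
          refine ⟨List.Pairwise.sublist (List.takeWhile_sublist _) hdesc, ?_, ?_⟩
          · rw [List.pairwise_cons]
            exact ⟨hklt, List.Pairwise.sublist (List.dropWhile_sublist _) hdesc⟩
          · intro a ha b hb
            rcases List.mem_cons.mp hb with hb | hb
            · exact hb ▸ hgt a ha
            · exact lt_trans (hklt b hb) (hgt a ha)
      have hfc : f c = [] := by
        rw [hf]
        rw [List.filter_eq_nil_iff]
        intro s hs hkey
        exact hmem (List.mem_map.mpr ⟨s, hs, by simpa using hkey⟩)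
      have e1 : kgt.flatMap (fun k => f k ++ if c == k then [x] else []) = kgt.flatMap f :=
        flatMap_congr_mem (fun k hk => by simp [Int.ne_of_lt (hgt k hk)])
      have e2 : krest.flatMap (fun k => f k ++ if c == k then [x] else []) = krest.flatMap f :=
        flatMap_congr_mem (fun k hk => by simp [Int.ne_of_gt (hklt k hk)])
      rw [hadd, hsorted']
      rw [List.flatMap_append, List.flatMap_cons, e1, e2]
      simp only [beq_self_eq_true, if_true, hfc, List.nil_append]
      rw [show List.flatMap f ks = List.flatMap f kgt ++ List.flatMap f krest by
        rw [← List.flatMap_append, hsplit]]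
      rw [insertBy_split (fun a b => decide (key b < key a)) x
        (kgt.flatMap f) (krest.flatMap f)
        (by
          intro y hy
          obtain ⟨k, hk, hyk⟩ := List.mem_flatMap.mp hy
          have hky : key y = k := mem_bucket_key key xs k y hyk
          simp [hky, ← hc, not_lt.mpr (le_of_lt (hgt k hk))])
        (by
          intro y hy
          obtain ⟨k, hk, hyk⟩ := List.mem_flatMap.mp hy
          have hky : key y = k := mem_bucket_key key xs k y hyk
          simp [hky, ← hc, hklt k hk])]
      simp

theorem alt_eq_canon (my_list : List String) :
    sort_by_vowel_count_alt my_list = canon countVowelsB my_list := by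
  unfold sort_by_vowel_count_alt canon
  have hfold : my_list.foldl (fun d s => d.modify (countVowelsB s) [] (fun b => b ++ [s])) PySem.Dict.empty
      = (my_list.map (fun s => (countVowelsB s, s))).foldl (fun d p => d.modify p.1 [] (fun b => b ++ [p.2])) PySem.Dict.empty := by
    rw [List.foldl_map]
  have hkeys : (my_list.foldl (fun d s => d.modify (countVowelsB s) [] (fun b => b ++ [s])) PySem.Dict.empty).keys
      = PySem.Set.ofList (my_list.map countVowelsB) := by
    rw [PySem.Dict.keys_foldl_modify_key my_list countVowelsB [] (fun _ x => (fun b => b ++ [x]))]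
    simp [PySem.Set.update, PySem.Set.ofList, PySem.Dict.keys_empty]
  have hgetD : ∀ k : Int, (my_list.foldl (fun d s => d.modify (countVowelsB s) [] (fun b => b ++ [s])) PySem.Dict.empty).getD k []
      = my_list.filter (fun s => countVowelsB s == k) := by
    intro k
    rw [hfold, PySem.Dict.getD_foldl_modify_append]
    simp [List.filter_map, Function.comp_def]
  simp only [hkeys]
  rw [PySem.List.foldl_append_eq_flatMap]
  simp only [hgetD, List.nil_append]

-- ===== VERDICT (by name: the statement is the Claim_ definition above) =====
theorem sort_by_vowel_count_spec : Claim_equal_sort_by_vowel_count := by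
  intro my_list _
  unfold Spec_sort_by_vowel_count sort_by_vowel_count
  rw [alt_eq_canon, sorted_eq_canon]
  have : countVowelsB = countVowelsA := funext countVowels_eq
  rw [this]
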